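-- pv_equiv track=rewrite | github.com/Ian-Dzindo01/HackerRank_Challenges | Two_Characters_UNDERSTAND.py | alternate
-- ===== SOURCE A (Python) =====
-- def alternate(s):
--     maxnum = count = 0
--     uni = list(set(s))     # extracts unique chars from the string
--
--     for i in range(len(uni)):
--         for j in range(i+1, len(uni)):
--             l = [uni[i], uni[j]]
--
--             if s.index(uni[i]) < s.index(uni[j]):
--                 ind = 0
--             else:
--                 ind = 1
--
--
--             for char in s:
--                 if char in l:
--                     if char == l[ind]:
--                         count += 1
--                         ind = ind ^ 1
--                     else:
--                         count = 0
--                         break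
--
--             maxnum = max(maxnum, count)
--             count = 0
--
--     return maxnum
-- ===== SOURCE B (Python) =====
-- def alternate(s):
--     # One pass over s updating a per-pair alternation state, instead of rescanning s for every pair.
--     chars = sorted(set(s))
--
--     def _pairs(cs):
--         if not cs:
--             return []
--         a, rest = cs[0], cs[1:]
--         return [(a, b) for b in rest] + _pairs(rest)
--
--     state = {}
--     for key in _pairs(chars):
--         state[key] = (None, 0, True)
--
--     for c in s:
--         for d in chars:
--             if d == c:
--                 continue
--             key = (c, d) if c < d else (d, c)
--             last, cnt, ok = state[key]
--             if ok:
--                 if last == c: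
--                     state[key] = (last, cnt, False)
--                 else:
--                     state[key] = (c, cnt + 1, True)
--
--     best = 0
--     for last, cnt, ok in state.values():
--         if ok and cnt > best:
--             best = cnt
--     return best
-- ===== Notes on version B (the rewrite author's own statement) =====
-- stated objective: alternative
-- what changed: B makes a single pass over s, updating an alternation state (last char, count, alive flag) per character pair held in a dict, instead of A's re-scan of the whole string for every pair with two s.index() prescans and xor index-toggling.
import Mathlib
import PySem

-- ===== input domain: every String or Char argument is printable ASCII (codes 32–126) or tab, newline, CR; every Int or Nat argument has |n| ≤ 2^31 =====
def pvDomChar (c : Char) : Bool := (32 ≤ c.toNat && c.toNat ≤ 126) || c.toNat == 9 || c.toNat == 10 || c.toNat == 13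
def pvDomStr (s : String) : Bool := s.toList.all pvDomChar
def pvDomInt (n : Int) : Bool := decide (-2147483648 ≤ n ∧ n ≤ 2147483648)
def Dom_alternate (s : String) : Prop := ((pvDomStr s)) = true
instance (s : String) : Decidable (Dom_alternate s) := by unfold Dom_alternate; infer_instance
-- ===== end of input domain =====

-- B replaces A's per-pair rescans of s by one pass over s that updates a per-pair alternation
-- state held in a dict; objective: alternative algorithm (same results, different traversal).

-- ===== PORT A =====
-- A's inner 'for char in s' loop; Python's break happens right after count = 0, so breaking returns 0
def pvLoopA (l0 l1 : Char) : List Char → Int → Int → Int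
  | [], count, _ => count
  | c :: rest, count, ind =>
    if [l0, l1].contains c then
      if c = PySem.List.pyGetD [l0, l1] ind l0 then
        pvLoopA l0 l1 rest (count + 1) (PySem.Int.bxor ind 1)
      else 0
    else pvLoopA l0 l1 rest count ind

def alternate (s : String) : Int :=
  -- uni = list(set(s)); the result does not depend on CPython's arbitrary set order (all pairs are tried)
  let uni := PySem.Set.ofList s.toList
  let res := (PySem.List.pyRange 0 (uni.length : Int) 1).foldl (fun (st : Int × Int) i =>
      (PySem.List.pyRange (i + 1) (uni.length : Int) 1).foldl (fun (st : Int × Int) j =>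
        let a := PySem.List.pyGetD uni i ' '
        let b := PySem.List.pyGetD uni j ' '
        -- s.index(c) never raises here (c comes from set(s)), so reading index? through .getD 0 is exact
        let ind : Int := if (PySem.List.index? s.toList a).getD 0 < (PySem.List.index? s.toList b).getD 0 then 0 else 1
        let count := pvLoopA a b s.toList st.2 ind
        (max st.1 count, 0)) st)
    ((0 : Int), (0 : Int))
  res.1

-- ===== PORT B =====
-- Source B's recursive helper _pairs(cs)
def pvPairs : List Char → List (Char × Char)
  | [] => []
  | a :: rest => (rest.map (fun b => (a, b))) ++ pvPairs rest

def alternate_alt (s : String) : Int :=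
  let chars := PySem.List.sorted (PySem.Set.ofList s.toList) (fun c => c) false
  let state0 : PySem.Dict (Char × Char) (Option Char × Int × Bool) :=
    (pvPairs chars).foldl (fun st key => st.insert key (none, 0, true)) PySem.Dict.empty
  let state := s.toList.foldl (fun st c =>
      chars.foldl (fun st d =>
        if d = c then st
        else
          let key := if c < d then (c, d) else (d, c)
          -- state[key] never raises: every such key was initialised, so .getD with any default is exact
          match st.getD key (none, 0, true) with
          | (last, cnt, ok) =>
            if ok then
              if last = some c then st.insert key (last, cnt, false)
              else st.insert key (some c, cnt + 1, true)
            else st) st) state0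
  state.values.foldl (fun best v =>
      match v with
      | (_, cnt, ok) => if ok = true ∧ cnt > best then cnt else best) 0

-- ===== PRECONDITION & SPEC =====
def Spec_alternate (s : String) (out : Int) : Prop := out = alternate_alt s
instance (s : String) (out : Int) : Decidable (Spec_alternate s out) := by unfold Spec_alternate; infer_instance

-- ===== CLAIM (what is proved, stated in full; the proofs are below) =====
def Claim_equal_alternate : Prop := ∀ (s : String), Dom_alternate s → Spec_alternate s (alternate s)

-- ===== LEMMAS AND PROOFS =====

-- proof-side vocabulary
def pvInPair (k : Char × Char) (c : Char) : Bool := c == k.1 || c == k.2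
def pvFilt (k : Char × Char) (u : List Char) : List Char := u.filter (pvInPair k)
-- the filtered subsequence has no two equal adjacent characters (seeded with 'last = lo')
def pvOkFrom : Option Char → List Char → Bool
  | _, [] => true
  | lo, c :: r => !(lo == some c) && pvOkFrom (some c) r
-- the common value both programs compute for a pair k of distinct characters of s
def pvVal (u : List Char) (k : Char × Char) : Int :=
  if pvOkFrom none (pvFilt k u) then ((pvFilt k u).length : Int) else 0

-- B's per-character state update (the body of Source B's dict write, as a function of the stored triple)
def pvStep (st : Option Char × Int × Bool) (c : Char) : Option Char × Int × Bool :=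
  match st with
  | (last, cnt, ok) =>
    if ok then (if last = some c then (last, cnt, false) else (some c, cnt + 1, true))
    else (last, cnt, ok)

def pvFlip (a b e : Char) : Char := if e = a then b else a
-- A's inner loop as a pure predicate: the next expected character is e, then it flips
def pvAltFrom (a b : Char) : Char → List Char → Bool
  | _, [] => true
  | e, c :: r => (c == e) && pvAltFrom a b (pvFlip a b e) r

def pvOther (k : Char × Char) (c : Char) : Char := if c = k.1 then k.2 else k.1

-- named folds matching the ports (definitionally equal to the inline lambdas)
def pvPairStep (s' : List Char) (st : Int × Int) (k : Char × Char) : Int × Int :=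
  (max st.1 (pvLoopA k.1 k.2 s' st.2
    (if (PySem.List.index? s' k.1).getD 0 < (PySem.List.index? s' k.2).getD 0 then 0 else 1)), 0)

def pvUpd (c : Char) (st : PySem.Dict (Char × Char) (Option Char × Int × Bool)) (d : Char) :
    PySem.Dict (Char × Char) (Option Char × Int × Bool) :=
  if d = c then st
  else
    let key := if c < d then (c, d) else (d, c)
    match st.getD key (none, 0, true) with
    | (last, cnt, ok) =>
      if ok then
        if last = some c then st.insert key (last, cnt, false)
        else st.insert key (some c, cnt + 1, true)
      else st

def pvBestStep (best : Int) (v : Option Char × Int × Bool) : Int :=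
  match v with
  | (_, cnt, ok) => if ok = true ∧ cnt > best then cnt else best

theorem pvPairs_mem (l : List Char) (k : Char × Char) (hk : k ∈ pvPairs l) :
    k.1 ∈ l ∧ k.2 ∈ l := by
  induction l with
  | nil => simp [pvPairs] at hk
  | cons a rest ih =>
    simp only [pvPairs, List.mem_append, List.mem_map] at hk
    rcases hk with ⟨b, hb, rfl⟩ | h
    · exact ⟨by simp, by simp [hb]⟩
    · obtain ⟨h1, h2⟩ := ih h; exact ⟨by simp [h1], by simp [h2]⟩

theorem pvPairs_pairwise (R : Char → Char → Prop) :
    ∀ (l : List Char), l.Pairwise R → ∀ k ∈ pvPairs l, R k.1 k.2 := by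
  intro l hl
  induction l with
  | nil => simp [pvPairs]
  | cons a rest ih =>
    rcases List.pairwise_cons.mp hl with ⟨ha, hrest⟩
    intro k hk
    simp only [pvPairs, List.mem_append, List.mem_map] at hk
    rcases hk with ⟨b, hb, rfl⟩ | h
    · exact ha b hb
    · exact ih hrest k h

theorem pvPairs_mem_intro :
    ∀ (l : List Char), l.Pairwise (· < ·) → ∀ (x y : Char), x ∈ l → y ∈ l → x < y →
      (x, y) ∈ pvPairs l := by
  intro l hl
  induction l with
  | nil => simp
  | cons a rest ih =>
    rcases List.pairwise_cons.mp hl with ⟨ha, hrest⟩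
    intro x y hx hy hxy
    simp only [pvPairs, List.mem_append, List.mem_map]
    rcases List.mem_cons.mp hx with rfl | hx'
    · left
      refine ⟨y, ?_, rfl⟩
      rcases List.mem_cons.mp hy with rfl | hy'
      · exact absurd hxy (lt_irrefl _)
      · exact hy'
    · right
      apply ih hrest x y hx'
      rcases List.mem_cons.mp hy with rfl | hy'
      · exact absurd (lt_trans (ha x hx') hxy) (lt_irrefl _)
      · exact hy'
      · exact hxy

-- one pvUpd step: getD view and keys view

theorem pvPairs_nodup : ∀ (l : List Char), l.Pairwise (· < ·) → (pvPairs l).Nodup := by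
  intro l hl
  induction l with
  | nil => simp [pvPairs]
  | cons a rest ih =>
    rcases List.pairwise_cons.mp hl with ⟨ha, hrest⟩
    simp only [pvPairs]
    apply List.Nodup.append
    · exact (hrest.nodup).map (fun {x y} h => (Prod.mk.inj h).2)
    · exact ih hrest
    · intro k hk1 hk2
      obtain ⟨b, _, rfl⟩ := List.mem_map.mp hk1
      have := (pvPairs_mem rest _ hk2).1
      exact absurd (ha _ this) (lt_irrefl a)

theorem pvFilt_cons_pos (k : Char × Char) (c : Char) (h : pvInPair k c = true) (r : List Char) :
    pvFilt k (c :: r) = c :: pvFilt k r := by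
  simp [pvFilt, h]

theorem pvFilt_cons_neg (k : Char × Char) (c : Char) (h : pvInPair k c = false) (r : List Char) :
    pvFilt k (c :: r) = pvFilt k r := by
  simp [pvFilt, h]

theorem pvGet0 (a b : Char) : PySem.List.pyGetD [a, b] 0 a = a := by
  rw [PySem.List.pyGetD_of_nonneg _ _ (by norm_num)]; rfl

theorem pvGet1 (a b : Char) : PySem.List.pyGetD [a, b] 1 a = b := by
  rw [PySem.List.pyGetD_of_nonneg _ _ (by norm_num)]; rfl

theorem pvBxor01 : PySem.Int.bxor 0 1 = 1 := by decide

theorem pvBxor11 : PySem.Int.bxor 1 1 = 0 := by decide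

theorem pvLoopA_spec (a b : Char) (hab : a ≠ b) :
    ∀ (u : List Char) (cnt ind : Int), ind = 0 ∨ ind = 1 →
      pvLoopA a b u cnt ind =
        if pvAltFrom a b (if ind = 0 then a else b) (pvFilt (a, b) u) = true
        then cnt + ((pvFilt (a, b) u).length : Int) else 0 := by
  intro u
  induction u with
  | nil => intro cnt ind _; simp [pvLoopA, pvFilt, pvAltFrom]
  | cons c r ih =>
    intro cnt ind hind
    by_cases hmem : c = a ∨ c = b
    · have hin : pvInPair (a, b) c = true := by
        simp only [pvInPair, Bool.or_eq_true, beq_iff_eq]; exact hmem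
      have hcontains : [a, b].contains c = true := by
        simp only [List.contains_eq_mem, List.mem_cons, decide_eq_true_eq]; tauto
      have hfilt : pvFilt (a, b) (c :: r) = c :: pvFilt (a, b) r := by
        simp [pvFilt, hin]
      have hflipa : pvFlip a b a = b := by simp [pvFlip]
      have hflipb : pvFlip a b b = a := by simp [pvFlip, Ne.symm hab]
      have e0 : (if (0:Int) = 0 then a else b) = a := if_pos rfl
      have e1 : (if (1:Int) = 0 then a else b) = b := if_neg (by omega)
      rcases hind with rfl | rfl
      · have hAlt : pvAltFrom a b (if (0:Int) = 0 then a else b) (c :: pvFilt (a, b) r)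
            = ((c == a) && pvAltFrom a b b (pvFilt (a, b) r)) := by
          rw [e0]; simp only [pvAltFrom, hflipa]
        rw [hfilt, hAlt]
        simp only [pvLoopA, hcontains, if_true, pvGet0, pvBxor01]
        by_cases hce : c = a
        · rw [if_pos hce, ih (cnt + 1) 1 (Or.inr rfl), e1]
          have : (c == a) = true := by simp [hce]
          rw [this, Bool.true_and, List.length_cons]
          split
          · push_cast; ring
          · rfl
        · rw [if_neg hce]
          simp [hce]
      · have hAlt : pvAltFrom a b (if (1:Int) = 0 then a else b) (c :: pvFilt (a, b) r)
            = ((c == b) && pvAltFrom a b a (pvFilt (a, b) r)) := by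
          rw [e1]; simp only [pvAltFrom, hflipb]
        rw [hfilt, hAlt]
        simp only [pvLoopA, hcontains, if_true, pvGet1, pvBxor11]
        by_cases hce : c = b
        · rw [if_pos hce, ih (cnt + 1) 0 (Or.inl rfl), e0]
          have : (c == b) = true := by simp [hce]
          rw [this, Bool.true_and, List.length_cons]
          split
          · push_cast; ring
          · rfl
        · rw [if_neg hce]
          simp [hce]
    · have hin : pvInPair (a, b) c = false := by
        simp only [pvInPair, Bool.or_eq_false_iff, beq_eq_false_iff_ne, ne_eq]
        exact ⟨fun h => hmem (Or.inl h), fun h => hmem (Or.inr h)⟩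
      have hcontains : [a, b].contains c = false := by
        simp only [List.contains_eq_mem, List.mem_cons, decide_eq_false_iff_not]
        simp only [List.mem_nil_iff, or_false]; exact hmem
      have hfilt : pvFilt (a, b) (c :: r) = pvFilt (a, b) r := by
        simp [pvFilt, hin]
      simp only [pvLoopA, hcontains, Bool.false_eq_true, if_false, hfilt]
      exact ih cnt ind hind


theorem pvAltFrom_eq_okFrom (a b : Char) (hab : a ≠ b) :
    ∀ (t : List Char), (∀ c ∈ t, c = a ∨ c = b) →
      ∀ c, (c = a ∨ c = b) → pvAltFrom a b (pvFlip a b c) t = pvOkFrom (some c) t := by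
  intro t
  induction t with
  | nil => intro _ c _; rfl
  | cons d r ih =>
    intro hmem c hc
    have hd : d = a ∨ d = b := hmem d (by simp)
    simp only [pvAltFrom, pvOkFrom]
    by_cases hcd : c = d
    · subst hcd
      have h2 : (c == pvFlip a b c) = false := by
        rcases hd with rfl | rfl <;> simp [pvFlip, hab, Ne.symm hab]
      rw [h2]
      simp
    · have h1 : (!(some c == some d)) = true := by simp [hcd]
      have hfc : pvFlip a b c = d := by
        rcases hc with rfl | rfl <;> rcases hd with rfl | rfl <;> simp_all [pvFlip]
      have h2 : (d == pvFlip a b c) = true := by simp [hfc]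
      rw [h1, h2, Bool.true_and, Bool.true_and, hfc]
      exact ih (fun x hx => hmem x (by simp [hx])) d hd

theorem pvHead_filt (a b : Char) (hab : a ≠ b) :
    ∀ (u : List Char), a ∈ u → b ∈ u →
      (pvFilt (a, b) u).head? =
        some (if (PySem.List.index? u a).getD 0 < (PySem.List.index? u b).getD 0 then a else b) := by
  intro u
  induction u with
  | nil => intro h; simp at h
  | cons c r ih =>
    intro ha hb
    by_cases hca : c = a
    · subst hca
      have hbr : b ∈ r := by
        rcases List.mem_cons.mp hb with h | h
        · exact absurd h.symm hab
        · exact h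
      obtain ⟨kb, hkb⟩ := Option.isSome_iff_exists.mp ((PySem.List.index?_isSome_iff r b).mpr hbr)
      rw [PySem.List.index?_cons_self, PySem.List.index?_cons_of_ne _ hab, hkb]
      rw [pvFilt_cons_pos _ _ (by simp [pvInPair])]
      simp
    · by_cases hcb : c = b
      · subst hcb
        have har : a ∈ r := by
          rcases List.mem_cons.mp ha with h | h
          · exact absurd h.symm hca
          · exact h
        obtain ⟨ka, hka⟩ := Option.isSome_iff_exists.mp ((PySem.List.index?_isSome_iff r a).mpr har)
        rw [PySem.List.index?_cons_self, PySem.List.index?_cons_of_ne _ hca, hka]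
        rw [pvFilt_cons_pos _ _ (by simp [pvInPair])]
        simp
      · have har : a ∈ r := by
          rcases List.mem_cons.mp ha with h | h
          · exact absurd h.symm hca
          · exact h
        have hbr : b ∈ r := by
          rcases List.mem_cons.mp hb with h | h
          · exact absurd h.symm hcb
          · exact h
        obtain ⟨ka, hka⟩ := Option.isSome_iff_exists.mp ((PySem.List.index?_isSome_iff r a).mpr har)
        obtain ⟨kb, hkb⟩ := Option.isSome_iff_exists.mp ((PySem.List.index?_isSome_iff r b).mpr hbr)
        rw [PySem.List.index?_cons_of_ne _ hca, PySem.List.index?_cons_of_ne _ hcb, hka, hkb]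
        rw [pvFilt_cons_neg _ _ (by simp [pvInPair, hca, hcb])]
        rw [ih har hbr, hka, hkb]
        simp only [Option.getD_some, Option.map_some]
        by_cases hlt : ka < kb
        · rw [if_pos hlt, if_pos (by omega)]
        · rw [if_neg hlt, if_neg (by omega)]

theorem pvAltFrom_head (a b : Char) (hab : a ≠ b) (c : Char) (t : List Char)
    (hc : c = a ∨ c = b) (hmem : ∀ x ∈ t, x = a ∨ x = b) :
    pvAltFrom a b c (c :: t) = pvOkFrom none (c :: t) := by
  simp only [pvAltFrom, pvOkFrom, beq_self_eq_true, Bool.true_and]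
  have h1 : (!(none == some c)) = true := by simp
  rw [h1, Bool.true_and]
  exact pvAltFrom_eq_okFrom a b hab t hmem c hc

theorem pvA_pair_val (a b : Char) (hab : a ≠ b) (u : List Char) (ha : a ∈ u) (hb : b ∈ u) :
    pvLoopA a b u 0
        (if (PySem.List.index? u a).getD 0 < (PySem.List.index? u b).getD 0 then 0 else 1) =
      pvVal u (a, b) := by
  have hmem : ∀ c ∈ pvFilt (a, b) u, c = a ∨ c = b := by
    intro c hc
    have := List.of_mem_filter hc
    simpa [pvInPair] using this
  have hhead := pvHead_filt a b hab u ha hb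
  set P := (PySem.List.index? u a).getD 0 < (PySem.List.index? u b).getD 0 with hP
  have hind : (if P then (0:Int) else 1) = 0 ∨ (if P then (0:Int) else 1) = 1 := by
    by_cases h : P <;> simp [h]
  rw [pvLoopA_spec a b hab u 0 _ hind]
  have hE : (if (if P then (0:Int) else 1) = 0 then a else b) = (if P then a else b) := by
    by_cases h : P <;> simp [h]
  rw [hE]
  unfold pvVal
  cases hfilt : pvFilt (a, b) u with
  | nil => simp [pvAltFrom, pvOkFrom]
  | cons c t =>
    rw [hfilt] at hhead hmem
    have hc : c = (if P then a else b) := by simpa using hhead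
    have hcpair : c = a ∨ c = b := by
      by_cases h : P
      · rw [if_pos h] at hc; exact Or.inl hc
      · rw [if_neg h] at hc; exact Or.inr hc
    rw [← hc, pvAltFrom_head a b hab c t hcpair (fun x hx => hmem x (by simp [hx]))]
    simp

theorem pvA_range_fold (s' : List Char) (uni : List Char) :
    ∀ (m : Nat) (st : Int × Int),
      (PySem.List.pyRange (m : Int) (uni.length : Int) 1).foldl (fun (st : Int × Int) i =>
        (PySem.List.pyRange (i + 1) (uni.length : Int) 1).foldl (fun (st : Int × Int) j =>
          (max st.1 (pvLoopA (PySem.List.pyGetD uni i ' ') (PySem.List.pyGetD uni j ' ') s' st.2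
            (if (PySem.List.index? s' (PySem.List.pyGetD uni i ' ')).getD 0 <
                (PySem.List.index? s' (PySem.List.pyGetD uni j ' ')).getD 0 then 0 else 1)), 0)) st) st
      = (pvPairs (uni.drop m)).foldl (pvPairStep s') st := by
  suffices H : ∀ (k m : Nat) (st : Int × Int), uni.length - m = k →
      (PySem.List.pyRange (m : Int) (uni.length : Int) 1).foldl (fun (st : Int × Int) i =>
        (PySem.List.pyRange (i + 1) (uni.length : Int) 1).foldl (fun (st : Int × Int) j =>
          (max st.1 (pvLoopA (PySem.List.pyGetD uni i ' ') (PySem.List.pyGetD uni j ' ') s' st.2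
            (if (PySem.List.index? s' (PySem.List.pyGetD uni i ' ')).getD 0 <
                (PySem.List.index? s' (PySem.List.pyGetD uni j ' ')).getD 0 then 0 else 1)), 0)) st) st
      = (pvPairs (uni.drop m)).foldl (pvPairStep s') st by
    intro m st; exact H (uni.length - m) m st rfl
  intro k
  induction k with
  | zero =>
    intro m st hk
    have hle : uni.length ≤ m := by omega
    rw [PySem.List.pyRange_one_eq_nil (by exact_mod_cast hle)]
    rw [List.drop_eq_nil_of_le hle]
    rfl
  | succ k ih =>
    intro m st hk
    have hlt : m < uni.length := by omega
    rw [PySem.List.pyRange_one_cons (by exact_mod_cast hlt)]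
    rw [List.foldl_cons]
    have hcast : ((m : Int) + 1) = ((m + 1 : Nat) : Int) := by push_cast; ring
    have hget : PySem.List.pyGetD uni (m : Int) ' ' = uni[m] := by
      rw [PySem.List.pyGetD_of_nonneg _ _ (by positivity)]
      simp [List.getD_eq_getElem?_getD, List.getElem?_eq_getElem hlt]
    have hinner : ∀ (st : Int × Int),
        (PySem.List.pyRange ((m : Int) + 1) (uni.length : Int) 1).foldl (fun (st : Int × Int) j =>
          (max st.1 (pvLoopA (PySem.List.pyGetD uni (m : Int) ' ') (PySem.List.pyGetD uni j ' ') s' st.2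
            (if (PySem.List.index? s' (PySem.List.pyGetD uni (m : Int) ' ')).getD 0 <
                (PySem.List.index? s' (PySem.List.pyGetD uni j ' ')).getD 0 then 0 else 1)), 0)) st
        = ((uni.drop (m + 1)).map (fun b => (uni[m], b))).foldl (pvPairStep s') st := by
      intro st
      rw [List.foldl_map]
      rw [hcast]
      rw [PySem.List.foldl_pyRange_pyGetD' uni ' '
        (fun (st : Int × Int) b =>
          (max st.1 (pvLoopA (PySem.List.pyGetD uni (m : Int) ' ') b s' st.2
            (if (PySem.List.index? s' (PySem.List.pyGetD uni (m : Int) ' ')).getD 0 <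
                (PySem.List.index? s' b).getD 0 then 0 else 1)), 0)) st (by positivity)]
      simp only [Int.toNat_natCast, hget]
      rfl
    rw [hinner]
    rw [List.drop_eq_getElem_cons hlt]
    simp only [pvPairs, List.foldl_append]
    rw [hcast, ih (m + 1) _ (by omega)]

theorem pvPairStep_fst (s' : List Char) :
    ∀ (L : List (Char × Char)) (mx : Int),
      (L.foldl (pvPairStep s') (mx, 0)).1 =
        L.foldl (fun mx k => max mx (pvLoopA k.1 k.2 s' 0
          (if (PySem.List.index? s' k.1).getD 0 < (PySem.List.index? s' k.2).getD 0 then 0 else 1))) mx := by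
  intro L
  induction L with
  | nil => intro mx; rfl
  | cons k L ih => intro mx; simp only [List.foldl_cons, pvPairStep]; exact ih _

theorem pvStep_false : ∀ (t : List Char) (lo : Option Char) (cnt : Int),
    t.foldl pvStep (lo, cnt, false) = (lo, cnt, false) := by
  intro t
  induction t with
  | nil => intro lo cnt; rfl
  | cons c r ih => intro lo cnt; simp [pvStep]; exact ih lo cnt

theorem pvRun_ok : ∀ (t : List Char) (lo : Option Char) (cnt : Int),
    (t.foldl pvStep (lo, cnt, true)).2.2 = pvOkFrom lo t ∧
    (pvOkFrom lo t = true → t.foldl pvStep (lo, cnt, true) = (t.getLast?.or lo, cnt + (t.length : Int), true)) := by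
  intro t
  induction t with
  | nil => intro lo cnt; simp [pvOkFrom]
  | cons c r ih =>
    intro lo cnt
    by_cases h : lo = some c
    · subst h
      simp [List.foldl_cons, pvStep, pvOkFrom, pvStep_false]
    · have hstep : pvStep (lo, cnt, true) c = (some c, cnt + 1, true) := by
        simp [pvStep, h]
      constructor
      · simp only [List.foldl_cons, hstep, pvOkFrom]
        rw [(ih (some c) (cnt + 1)).1]
        simp [h]
      · intro hok
        simp only [pvOkFrom, Bool.and_eq_true, Bool.not_eq_true'] at hok
        simp only [List.foldl_cons, hstep]
        rw [(ih (some c) (cnt + 1)).2 hok.2]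
        cases r with
        | nil => simp
        | cons d r' =>
          obtain ⟨x, hx⟩ := Option.isSome_iff_exists.mp (List.getLast?_isSome.mpr (by simp) :
            (d :: r').getLast?.isSome)
          simp [List.getLast?_cons_cons, hx]
          ring

theorem pvRun_nonneg : ∀ (t : List Char) (lo : Option Char) (cnt : Int) (ok : Bool),
    0 ≤ cnt → 0 ≤ (t.foldl pvStep (lo, cnt, ok)).2.1 := by
  intro t
  induction t with
  | nil => intro lo cnt ok h; simpa using h
  | cons c r ih =>
    intro lo cnt ok h
    simp only [List.foldl_cons, pvStep]
    cases ok
    · exact ih lo cnt false h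
    · simp only [if_true]
      by_cases hl : lo = some c
      · simp only [hl]; exact ih _ _ _ h
      · simp only [if_neg hl]; exact ih _ _ _ (by omega)

theorem pvUpd_keys (chars : List Char) (hchars : chars.Pairwise (· < ·))
    (c dd : Char) (hc : c ∈ chars) (hdd : dd ∈ chars)
    (d : PySem.Dict (Char × Char) (Option Char × Int × Bool)) (hkeys : d.keys = pvPairs chars) :
    (pvUpd c d dd).keys = pvPairs chars := by
  unfold pvUpd
  by_cases h : dd = c
  · simp [h, hkeys]
  · simp only [if_neg h]
    have hkey : (if c < dd then (c, dd) else (dd, c)) ∈ pvPairs chars := by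
      rcases lt_or_gt_of_ne (fun hh => h hh.symm) with hlt | hgt
      · rw [if_pos hlt]; exact pvPairs_mem_intro chars hchars c dd hc hdd hlt
      · rw [if_neg (not_lt_of_gt hgt)]; exact pvPairs_mem_intro chars hchars dd c hdd hc hgt
    have hcont : d.contains (if c < dd then (c, dd) else (dd, c)) = true := by
      rw [PySem.Dict.contains_iff_mem_keys, hkeys]; exact hkey
    rcases hv : d.getD (if c < dd then (c, dd) else (dd, c)) (none, 0, true) with ⟨last, cnt, ok⟩
    cases ok
    · simp [hkeys]
    · by_cases hl : last = some c
      · simp only [if_true, if_pos hl]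
        rw [PySem.Dict.keys_insert_of_contains _ _ hcont, hkeys]
      · simp only [if_true, if_neg hl]
        rw [PySem.Dict.keys_insert_of_contains _ _ hcont, hkeys]

theorem pvUpd_getD (chars : List Char) (hchars : chars.Pairwise (· < ·))
    (c dd : Char) (k : Char × Char) (hk : k ∈ pvPairs chars)
    (d : PySem.Dict (Char × Char) (Option Char × Int × Bool)) :
    (pvUpd c d dd).getD k (none, 0, true) =
      if dd ≠ c ∧ pvInPair k c = true ∧ pvOther k c = dd then pvStep (d.getD k (none, 0, true)) c
      else d.getD k (none, 0, true) := by
  have hlt12 : k.1 < k.2 := pvPairs_pairwise (· < ·) chars hchars k hk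
  obtain ⟨k1, k2⟩ := k
  simp only at hlt12
  unfold pvUpd
  by_cases h : dd = c
  · simp [h]
  · simp only [if_neg h]
    have hiff : ((if c < dd then (c, dd) else (dd, c)) = (k1, k2)) ↔
        (pvInPair (k1, k2) c = true ∧ pvOther (k1, k2) c = dd) := by
      constructor
      · intro hkk
        rcases lt_or_gt_of_ne (fun hh => h hh.symm) with hlt | hgt
        · rw [if_pos hlt] at hkk
          injection hkk with e1 e2
          subst e1; subst e2
          simp [pvInPair, pvOther]
        · rw [if_neg (not_lt_of_gt hgt)] at hkk
          injection hkk with e1 e2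
          subst e1; subst e2
          have hne : c ≠ dd := fun hh => h hh.symm
          simp [pvInPair, pvOther, hne]
      · rintro ⟨hin, hoth⟩
        simp only [pvInPair, Bool.or_eq_true, beq_iff_eq] at hin
        unfold pvOther at hoth
        simp only at hoth
        rcases hin with h1 | h2
        · rw [if_pos h1] at hoth
          rw [h1, ← hoth, if_pos hlt12]
        · have hlt' : k1 < c := by rw [h2]; exact hlt12
          have hne : ¬(c = k1) := by intro hh; rw [hh] at hlt'; exact lt_irrefl _ hlt'
          rw [if_neg hne] at hoth
          rw [h2, ← hoth, if_neg (not_lt_of_gt hlt12)]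
    by_cases hkk : (if c < dd then (c, dd) else (dd, c)) = (k1, k2)
    · rcases hv : d.getD (if c < dd then (c, dd) else (dd, c)) (none, 0, true) with ⟨last, cnt, ok⟩
      rw [hkk] at hv
      have hcond : (dd ≠ c ∧ pvInPair (k1, k2) c = true ∧ pvOther (k1, k2) c = dd) :=
        ⟨h, hiff.mp hkk⟩
      rw [if_pos hcond, hv]
      rw [hkk]
      cases ok
      · simp only [Bool.false_eq_true, if_false, pvStep]
        rw [hv]
      · simp only [if_true, pvStep]
        by_cases hl : last = some c
        · rw [if_pos hl, if_pos hl, PySem.Dict.getD_insert]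
          simp
        · rw [if_neg hl, if_neg hl, PySem.Dict.getD_insert]
          simp
    · have hcond : ¬(dd ≠ c ∧ pvInPair (k1, k2) c = true ∧ pvOther (k1, k2) c = dd) := by
        intro hcc; exact hkk (hiff.mpr hcc.2)
      rw [if_neg hcond]
      rcases hv : d.getD (if c < dd then (c, dd) else (dd, c)) (none, 0, true) with ⟨last, cnt, ok⟩
      cases ok
      · rfl
      · simp only [if_true]
        by_cases hl : last = some c
        · rw [if_pos hl, PySem.Dict.getD_insert, if_neg (fun hh => hkk hh.symm)]
        · rw [if_neg hl, PySem.Dict.getD_insert, if_neg (fun hh => hkk hh.symm)]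

theorem pvInner_fold (chars : List Char) (hchars : chars.Pairwise (· < ·)) (c : Char) (hc : c ∈ chars) :
    ∀ (ds : List Char), ds.Nodup → (∀ dd ∈ ds, dd ∈ chars) →
      ∀ (d : PySem.Dict (Char × Char) (Option Char × Int × Bool)), d.keys = pvPairs chars →
        (ds.foldl (pvUpd c) d).keys = pvPairs chars ∧
        ∀ k ∈ pvPairs chars,
          (ds.foldl (pvUpd c) d).getD k (none, 0, true) =
            if pvInPair k c = true ∧ pvOther k c ∈ ds then pvStep (d.getD k (none, 0, true)) c
            else d.getD k (none, 0, true) := by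
  intro ds
  induction ds with
  | nil =>
    intro _ _ d hkeys
    refine ⟨hkeys, fun k _ => ?_⟩
    rw [if_neg (by simp)]
    rfl
  | cons dd rest ih =>
    intro hnd hmem d hkeys
    have hdd : dd ∈ chars := hmem dd (by simp)
    have hk1 : (pvUpd c d dd).keys = pvPairs chars := pvUpd_keys chars hchars c dd hc hdd d hkeys
    obtain ⟨hkeys', hgetD'⟩ := ih (List.nodup_cons.mp hnd).2 (fun x hx => hmem x (by simp [hx]))
      (pvUpd c d dd) hk1
    refine ⟨hkeys', fun k hk => ?_⟩
    rw [List.foldl_cons, hgetD' k hk, pvUpd_getD chars hchars c dd k hk d]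
    have hother_ne : pvInPair k c = true → pvOther k c ≠ c := by
      intro hin
      have hlt12 : k.1 < k.2 := pvPairs_pairwise (· < ·) chars hchars k hk
      simp only [pvInPair, Bool.or_eq_true, beq_iff_eq] at hin
      unfold pvOther
      rcases hin with h1 | h2
      · rw [if_pos h1]
        intro hh
        rw [h1] at hh
        rw [hh] at hlt12
        exact lt_irrefl _ hlt12
      · have hne : ¬(c = k.1) := by
          intro hh; rw [← hh, h2] at hlt12; exact lt_irrefl _ hlt12
        rw [if_neg hne]
        intro hh
        rw [h2] at hh
        rw [hh] at hlt12
        exact lt_irrefl _ hlt12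
    by_cases hin : pvInPair k c = true
    · by_cases hod : pvOther k c = dd
      · have hdc : dd ≠ c := by rw [← hod]; exact hother_ne hin
        rw [if_pos (show dd ≠ c ∧ pvInPair k c = true ∧ pvOther k c = dd from ⟨hdc, hin, hod⟩)]
        rw [if_neg (show ¬(pvInPair k c = true ∧ pvOther k c ∈ rest) by
          rintro ⟨_, hmem'⟩
          exact (List.nodup_cons.mp hnd).1 (hod ▸ hmem'))]
        rw [if_pos (show pvInPair k c = true ∧ pvOther k c ∈ dd :: rest from
          ⟨hin, by simp [hod]⟩)]
      · rw [if_neg (show ¬(dd ≠ c ∧ pvInPair k c = true ∧ pvOther k c = dd) from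
          fun hcc => hod hcc.2.2)]
        by_cases hmr : pvOther k c ∈ rest
        · rw [if_pos (show pvInPair k c = true ∧ pvOther k c ∈ rest from ⟨hin, hmr⟩),
            if_pos (show pvInPair k c = true ∧ pvOther k c ∈ dd :: rest from
              ⟨hin, by simp [hmr]⟩)]
        · rw [if_neg (show ¬(pvInPair k c = true ∧ pvOther k c ∈ rest) from
            fun hcc => hmr hcc.2),
            if_neg (show ¬(pvInPair k c = true ∧ pvOther k c ∈ dd :: rest) by
              rintro ⟨_, hmem'⟩
              rcases List.mem_cons.mp hmem' with hh | hh
              · exact hod hh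
              · exact hmr hh)]
    · rw [if_neg (show ¬(pvInPair k c = true ∧ pvOther k c ∈ rest) from fun hcc => hin hcc.1),
        if_neg (show ¬(dd ≠ c ∧ pvInPair k c = true ∧ pvOther k c = dd) from
          fun hcc => hin hcc.2.1),
        if_neg (show ¬(pvInPair k c = true ∧ pvOther k c ∈ dd :: rest) from
          fun hcc => hin hcc.1)]

theorem pvOuter_fold (chars : List Char) (hchars : chars.Pairwise (· < ·)) :
    ∀ (u : List Char), (∀ x ∈ u, x ∈ chars) →
      ∀ (d : PySem.Dict (Char × Char) (Option Char × Int × Bool)), d.keys = pvPairs chars →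
      ∀ (g : Char × Char → Option Char × Int × Bool),
        (∀ k ∈ pvPairs chars, d.getD k (none, 0, true) = g k) →
        (u.foldl (fun st c => chars.foldl (pvUpd c) st) d).keys = pvPairs chars ∧
        ∀ k ∈ pvPairs chars,
          (u.foldl (fun st c => chars.foldl (pvUpd c) st) d).getD k (none, 0, true) =
            (pvFilt k u).foldl pvStep (g k) := by
  intro u
  induction u with
  | nil =>
    intro _ d hkeys g hg
    exact ⟨hkeys, fun k hk => hg k hk⟩
  | cons c u' ih =>
    intro hmem d hkeys g hg
    have hc : c ∈ chars := hmem c (by simp)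
    have hnd : chars.Nodup := hchars.imp ne_of_lt
    obtain ⟨hkeys1, hgetD1⟩ := pvInner_fold chars hchars c hc chars hnd (fun x hx => hx) d hkeys
    have hg' : ∀ k ∈ pvPairs chars,
        (chars.foldl (pvUpd c) d).getD k (none, 0, true) =
          (if pvInPair k c = true then pvStep (g k) c else g k) := by
      intro k hk
      rw [hgetD1 k hk]
      by_cases hin : pvInPair k c = true
      · have hoth : pvOther k c ∈ chars := by
          obtain ⟨h1, h2⟩ := pvPairs_mem chars k hk
          unfold pvOther
          split <;> assumption
        rw [if_pos (show pvInPair k c = true ∧ pvOther k c ∈ chars from ⟨hin, hoth⟩),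
          if_pos hin, hg k hk]
      · rw [if_neg (show ¬(pvInPair k c = true ∧ pvOther k c ∈ chars) from fun hcc => hin hcc.1),
          if_neg hin, hg k hk]
    obtain ⟨hkeys2, hgetD2⟩ := ih (fun x hx => hmem x (by simp [hx])) (chars.foldl (pvUpd c) d)
      hkeys1 (fun k => if pvInPair k c = true then pvStep (g k) c else g k) hg'
    refine ⟨hkeys2, fun k hk => ?_⟩
    rw [List.foldl_cons, hgetD2 k hk]
    by_cases hin : pvInPair k c = true
    · rw [pvFilt_cons_pos k c hin, List.foldl_cons, if_pos hin]
    · rw [pvFilt_cons_neg k c (by simpa using hin), if_neg hin]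

theorem pvInit_items (P : List (Char × Char)) (hP : P.Nodup) :
    (P.foldl (fun st key => st.insert key ((none, 0, true) : Option Char × Int × Bool))
      PySem.Dict.empty).items = P.map (fun k => (k, ((none, 0, true) : Option Char × Int × Bool))) := by
  rw [PySem.Dict.items_foldl_insert_fresh P (fun k => k) (fun _ => (none, 0, true))
    PySem.Dict.empty (fun a _ => PySem.Dict.contains_empty a) (by simpa using hP)]
  show PySem.Dict.empty.items ++ _ = _
  rw [show PySem.Dict.empty.items = ([] : List ((Char × Char) × (Option Char × Int × Bool))) from rfl,
    List.nil_append]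

theorem pvBest_fold : ∀ (vs : List (Option Char × Int × Bool)) (b : Int), 0 ≤ b →
    (∀ v ∈ vs, 0 ≤ v.2.1) →
    vs.foldl pvBestStep b = vs.foldl (fun b v => max b (if v.2.2 = true then v.2.1 else 0)) b := by
  intro vs
  induction vs with
  | nil => intro b _ _; rfl
  | cons v rest ih =>
    intro b hb hnn
    rcases v with ⟨last, cnt, ok⟩
    have hcnt : 0 ≤ cnt := hnn (last, cnt, ok) List.mem_cons_self
    simp only [List.foldl_cons]
    have hstep : pvBestStep b (last, cnt, ok) = max b (if ok = true then cnt else 0) := by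
      unfold pvBestStep
      cases ok <;> by_cases hgt : cnt > b <;> simp [hgt] <;> omega
    rw [hstep, ih _ (le_trans hb (le_max_left _ _)) (fun v hv => hnn v (by simp [hv]))]

theorem pvVal_swap (u : List Char) (x y : Char) : pvVal u (x, y) = pvVal u (y, x) := by
  have h : pvFilt (x, y) u = pvFilt (y, x) u := by
    unfold pvFilt; apply List.filter_congr; intro c _; simp [pvInPair, Bool.or_comm]
  simp [pvVal, h]

theorem pvPairs_map_perm (u : List Char) :
    ∀ {l l' : List Char}, l.Perm l' →
      ((pvPairs l).map (pvVal u)).Perm ((pvPairs l').map (pvVal u)) := by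
  intro l l' h
  induction h with
  | nil => exact List.Perm.refl _
  | cons x h ih =>
    simp only [pvPairs, List.map_append, List.map_map]
    refine List.Perm.append ?_ ih
    exact (h.map _)
  | swap x y l =>
    simp only [pvPairs, List.map_append, List.map_map, List.map_cons]
    simp only [List.cons_append]
    rw [pvVal_swap u y x]
    refine List.Perm.cons _ ?_
    rw [← List.append_assoc, ← List.append_assoc]
    exact List.Perm.append_right _ (List.perm_append_comm)
  | trans h1 h2 ih1 ih2 => exact ih1.trans ih2

-- ---------- assembly ----------

theorem alternate_eq_fold (s : String) :
    alternate s =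
      ((pvPairs (PySem.Set.ofList s.toList)).map (pvVal s.toList)).foldl max 0 := by
  have h0 : alternate s =
      ((PySem.List.pyRange ((0 : Nat) : Int) ((PySem.Set.ofList s.toList).length : Int) 1).foldl
        (fun (st : Int × Int) i =>
          (PySem.List.pyRange (i + 1) ((PySem.Set.ofList s.toList).length : Int) 1).foldl
            (fun (st : Int × Int) j =>
              (max st.1 (pvLoopA (PySem.List.pyGetD (PySem.Set.ofList s.toList) i ' ')
                  (PySem.List.pyGetD (PySem.Set.ofList s.toList) j ' ') s.toList st.2
                (if (PySem.List.index? s.toList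
                      (PySem.List.pyGetD (PySem.Set.ofList s.toList) i ' ')).getD 0 <
                    (PySem.List.index? s.toList
                      (PySem.List.pyGetD (PySem.Set.ofList s.toList) j ' ')).getD 0
                  then 0 else 1)), 0)) st)
        ((0 : Int), (0 : Int))).1 := rfl
  rw [h0, pvA_range_fold s.toList (PySem.Set.ofList s.toList) 0, List.drop_zero,
    pvPairStep_fst, List.foldl_map]
  apply PySem.List.foldl_congr_mem
  intro acc k hk
  obtain ⟨h1, h2⟩ := pvPairs_mem (PySem.Set.ofList s.toList) k hk
  have hne : k.1 ≠ k.2 :=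
    pvPairs_pairwise (· ≠ ·) (PySem.Set.ofList s.toList) (PySem.Set.nodup_ofList s.toList) k hk
  have hv := pvA_pair_val k.1 k.2 hne s.toList
    ((PySem.Set.mem_ofList s.toList k.1).mp h1) ((PySem.Set.mem_ofList s.toList k.2).mp h2)
  rw [hv]

theorem alternate_alt_eq_fold (s : String) :
    alternate_alt s =
      ((pvPairs (PySem.List.sorted (PySem.Set.ofList s.toList) (fun c => c) false)).map
        (pvVal s.toList)).foldl max 0 := by
  set chars := PySem.List.sorted (PySem.Set.ofList s.toList) (fun c => c) false with hch
  have hchars : chars.Pairwise (· < ·) := PySem.List.sorted_ofList_pairwise_lt s.toList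
  have hP : (pvPairs chars).Nodup := pvPairs_nodup chars hchars
  set state0 := (pvPairs chars).foldl
    (fun st key => st.insert key ((none, 0, true) : Option Char × Int × Bool))
    PySem.Dict.empty with hs0
  have hitems : state0.items =
      (pvPairs chars).map (fun k => (k, ((none, 0, true) : Option Char × Int × Bool))) :=
    pvInit_items (pvPairs chars) hP
  have hkeys0 : state0.keys = pvPairs chars := by
    show state0.items.map Prod.fst = pvPairs chars
    rw [hitems, List.map_map]
    rw [show (Prod.fst ∘ fun k : Char × Char => (k, ((none, 0, true) : Option Char × Int × Bool)))
      = id from rfl, List.map_id]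
  have hget0 : ∀ k ∈ pvPairs chars,
      state0.getD k (none, 0, true) = ((none, 0, true) : Option Char × Int × Bool) := by
    intro k hk
    have hmemitem : (k, ((none, 0, true) : Option Char × Int × Bool)) ∈ state0.items := by
      rw [hitems]; exact List.mem_map.mpr ⟨k, hk, rfl⟩
    exact PySem.Dict.getD_of_mem_items state0 hmemitem (by rw [hkeys0]; exact hP) _
  have hmem : ∀ x ∈ s.toList, x ∈ chars := by
    intro x hx
    rw [hch, PySem.List.mem_sorted, PySem.Set.mem_ofList]
    exact hx
  obtain ⟨hkeysF, hgetF⟩ := pvOuter_fold chars hchars s.toList hmem state0 hkeys0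
    (fun _ => ((none, 0, true) : Option Char × Int × Bool)) hget0
  set stateF := s.toList.foldl (fun st c => chars.foldl (pvUpd c) st) state0 with hsF
  have h0 : alternate_alt s = stateF.values.foldl pvBestStep 0 := rfl
  rw [h0]
  have hvals : stateF.values = (pvPairs chars).map
      (fun k => (pvFilt k s.toList).foldl pvStep ((none, 0, true) : Option Char × Int × Bool)) := by
    rw [PySem.Dict.values_eq_map_keys stateF (hkeysF ▸ hP) ((none, 0, true) :
      Option Char × Int × Bool), hkeysF]
    exact List.map_congr_left (fun k hk => hgetF k hk)
  rw [hvals]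
  rw [pvBest_fold _ 0 (le_refl 0) (by
    intro v hv
    obtain ⟨k, _, rfl⟩ := List.mem_map.mp hv
    exact pvRun_nonneg (pvFilt k s.toList) none 0 true (le_refl 0))]
  rw [List.foldl_map, List.foldl_map]
  apply PySem.List.foldl_congr_mem
  intro acc k _
  congr 1
  obtain ⟨hok, hval⟩ := pvRun_ok (pvFilt k s.toList) none 0
  unfold pvVal
  by_cases h : pvOkFrom none (pvFilt k s.toList) = true
  · rw [hok, h, hval h]
    simp
  · rw [hok, if_neg h, if_neg h]

-- ===== VERDICT (by name: the statement is the Claim_ definition above) =====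
theorem alternate_spec : Claim_equal_alternate := by
  intro s _
  show alternate s = alternate_alt s
  rw [alternate_eq_fold, alternate_alt_eq_fold]
  exact (pvPairs_map_perm s.toList
    ((PySem.List.sorted_perm (PySem.Set.ofList s.toList) (fun c => c) false)).symm).foldl_eq 0
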